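-- pv_equiv track=rewrite | github.com/aleksozolins/org-bridge | server/org_parser.py | find_heading_insertion_point
-- ===== SOURCE A (Python) =====
-- from typing import Optional, List, Tuple
--
-- def find_heading_insertion_point(lines: List[str], target_heading: str) -> Optional[Tuple[int, int]]:
--     """
--     Find the insertion point for a TODO under a specific heading.
--
--     Args:
--         lines: List of file lines
--         target_heading: The heading text to search for (without the * prefix)
--
--     Returns:
--         Tuple of (line index where TODO should be inserted, heading level) or None if heading not found
--     """
--     target_heading = target_heading.strip()
--
--     for i, line in enumerate(lines):
--         line = line.strip()
--
--         # Check if this line is a heading that matches our target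
--         if line.startswith('*') and line.count('*') >= 1:
--             # Extract heading text (remove * and any tags)
--             heading_text = line.lstrip('*').strip()
--
--             # Remove tags if present (anything after the last space that contains :)
--             if ':' in heading_text and heading_text.endswith(':'):
--                 # Find the last space before tags
--                 words = heading_text.split()
--                 for j in range(len(words) - 1, -1, -1):
--                     if ':' not in words[j]:
--                         heading_text = ' '.join(words[:j+1])
--                         break
--                 else:
--                     # All words contain :, so it's just tags
--                     continue
--
--             # Check if this heading matches our target
--             if heading_text == target_heading:
--                 # Found the heading! Now find where to insert the TODO
--                 heading_level = line.count('*')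
--
--                 # Look for the end of this heading's content
--                 # We want to insert before any subheading or next heading of same/higher level
--                 for j in range(i + 1, len(lines)):
--                     next_line = lines[j].strip()
--
--                     # If we find another heading, check its level
--                     if next_line.startswith('*'):
--                         next_heading_level = next_line.count('*')
--
--                         # If it's same level or higher (fewer *), insert before it
--                         if next_heading_level <= heading_level:
--                             return j, heading_level
--
--                 # If we reach here, insert at the end of the file
--                 return len(lines), heading_level
--
--     # Heading not found
--     return None
-- ===== SOURCE B (Python) =====
-- from typing import Optional, List, Tuple
--
--
-- def _heading_text(stripped: str) -> Optional[str]: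
--     """Heading text of a stripped '*'-line; None when the line is all tags."""
--     text = stripped.lstrip('*').strip()
--     if ':' in text and text.endswith(':'):
--         words = text.split()
--         k = len(words)
--         while k and ':' in words[k - 1]:
--             k -= 1
--         if k == 0:
--             return None
--         return ' '.join(words[:k])
--     return text
--
--
-- def find_heading_insertion_point(lines: List[str], target_heading: str) -> Optional[Tuple[int, int]]:
--     target = target_heading.strip()
--     n = len(lines)
--     # Backward pass with a monotonic stack: precompute, for EVERY heading line,
--     # the index of the first later heading of same-or-shallower level.
--     # stack holds (index, level) of later headings, levels strictly decreasing
--     # downward (suffix record-minima); the insertion point of a heading of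
--     # level lvl is the topmost stack entry with level <= lvl.
--     heads = []   # built in backward order: (stripped line, level, insertion index)
--     stack = []
--     for i in range(n - 1, -1, -1):
--         s = lines[i].strip()
--         if s.startswith('*'):
--             lvl = s.count('*')
--             while stack and stack[-1][1] > lvl:
--                 stack.pop()
--             ins = stack[-1][0] if stack else n
--             if stack and stack[-1][1] == lvl:
--                 stack.pop()
--             stack.append((i, lvl))
--             heads.append((s, lvl, ins))
--     heads.reverse()
--     # Forward pass over headings only: first one whose parsed text matches.
--     for (s, lvl, ins) in heads:
--         if _heading_text(s) == target:
--             return (ins, lvl)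
--     return None
-- ===== Notes on version B (the rewrite author's own statement) =====
-- stated objective: alternative
-- what changed: B replaces A's forward search with a nested rescan from the match by a backward pass that precomputes, with a monotonic stack of (index, level), the insertion point of every heading line at once, followed by a forward match over the collected headings; the tag words are dropped from the right by a countdown instead of A's for-else index loop with join.
import Mathlib
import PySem

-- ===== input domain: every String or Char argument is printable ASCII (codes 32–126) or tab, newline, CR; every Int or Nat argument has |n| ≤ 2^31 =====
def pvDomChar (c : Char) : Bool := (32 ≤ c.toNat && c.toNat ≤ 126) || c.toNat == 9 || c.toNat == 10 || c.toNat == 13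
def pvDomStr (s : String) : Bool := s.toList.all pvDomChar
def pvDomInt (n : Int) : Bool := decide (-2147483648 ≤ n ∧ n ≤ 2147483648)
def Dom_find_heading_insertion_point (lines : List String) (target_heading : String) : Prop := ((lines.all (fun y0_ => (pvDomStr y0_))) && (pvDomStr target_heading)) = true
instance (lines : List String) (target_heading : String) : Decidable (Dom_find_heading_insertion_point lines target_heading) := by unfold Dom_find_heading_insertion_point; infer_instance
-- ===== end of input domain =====

-- B replaces A's forward search with a nested rescan by a backward monotonic-stack pass that
-- precomputes every heading's insertion point at once; objective: alternative structure, same cost.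

-- ===== PORT A =====
-- Python's `line.lstrip('*')`: drop the leading '*' characters (exact: lstrip with a char set).
def pvLstripStars (s : List Char) : List Char := s.dropWhile (· == '*')

-- A's tag loop `for j in range(len(words)-1, -1, -1): …` (argument = Python index + 1; none = the for-else `continue`)
def pvTagLoopA (words : List (List Char)) : Nat → Option (List Char)
  | 0 => none
  | j+1 =>
    if PySem.Chars.isIn [':'] (words.getD j []) then pvTagLoopA words j
    else some (PySem.Chars.join [' '] (words.take (j+1)))

-- A's tag-removal branch `if ':' in heading_text and heading_text.endswith(':')`
def pvTagStripA (t : List Char) : Option (List Char) :=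
  if PySem.Chars.isIn [':'] t && PySem.Chars.endswith t [':'] then
    pvTagLoopA (PySem.Chars.split₀ t) (PySem.Chars.split₀ t).length
  else some t

-- A's heading-text extraction on the already-stripped line
def pvHeadTextA (s : List Char) : Option (List Char) :=
  pvTagStripA (PySem.Chars.strip (pvLstripStars s))

-- A's inner scan `for j in range(i + 1, len(lines)): …` as recursion over the suffix with the running index
def pvScanA (lvl : Nat) : List String → Nat → Option Nat
  | [], _ => none
  | l :: rs, j =>
    let s := PySem.Chars.strip l.toList
    if PySem.Chars.startswith s ['*'] then
      if PySem.Chars.count s ['*'] ≤ lvl then some j else pvScanA lvl rs (j+1)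
    else pvScanA lvl rs (j+1)

-- A's outer `for i, line in enumerate(lines)` loop
def pvLoopA (total : Nat) (target : List Char) : List String → Nat → Option (Int × Int)
  | [], _ => none
  | l :: rs, i =>
    let s := PySem.Chars.strip l.toList
    if PySem.Chars.startswith s ['*'] && decide (1 ≤ PySem.Chars.count s ['*']) then
      match pvHeadTextA s with
      | none => pvLoopA total target rs (i+1)   -- `continue`: all words are tags
      | some ht =>
        if ht = target then
          let lvl := PySem.Chars.count s ['*']
          match pvScanA lvl rs (i+1) with
          | some j => some ((j : Int), (lvl : Int))
          | none => some ((total : Int), (lvl : Int))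
        else pvLoopA total target rs (i+1)
    else pvLoopA total target rs (i+1)

def find_heading_insertion_point (lines : List String) (target_heading : String) : Option (Int × Int) :=
  pvLoopA lines.length (PySem.Chars.strip target_heading.toList) lines 0

-- ===== PORT B =====
-- B's heading text: same tag condition, but the trailing ':'-words are dropped from the
-- right in one countdown sweep (take k = reverse.dropWhile) instead of A's for-else loop
def pvTagStripB (t : List Char) : Option (List Char) :=
  if PySem.Chars.isIn [':'] t && PySem.Chars.endswith t [':'] then
    let kept := ((PySem.Chars.split₀ t).reverse.dropWhile (fun w => PySem.Chars.isIn [':'] w)).reverse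
    if kept.isEmpty then none else some (PySem.Chars.join [' '] kept)
  else some t

def pvHeadTextB (s : List Char) : Option (List Char) :=
  pvTagStripB (PySem.Chars.strip (s.dropWhile (· == '*')))

-- B's backward pass `for i in range(n-1, -1, -1)` as structural recursion: the suffix is
-- processed first, returning (monotonic stack of (index, level), heads in forward order:
-- (stripped line, level, insertion index))
def pvBackB (n : Nat) : List String → Nat → List (Nat × Nat) × List (List Char × Nat × Nat)
  | [], _ => ([], [])
  | l :: rs, i =>
    let r := pvBackB n rs (i+1)
    let s := PySem.Chars.strip l.toList
    if PySem.Chars.startswith s ['*'] then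
      let lvl := PySem.Chars.count s ['*']
      let stk1 := r.1.dropWhile (fun e => decide (lvl < e.2))   -- `while stack and stack[-1][1] > lvl: pop`
      let ins := match stk1 with | [] => n | e :: _ => e.1      -- `stack[-1][0] if stack else n`
      let stk2 := match stk1 with                               -- `if stack and stack[-1][1] == lvl: pop`
        | e :: t => if e.2 == lvl then t else stk1
        | [] => stk1
      ((i, lvl) :: stk2, (s, lvl, ins) :: r.2)
    else r

-- B's final forward loop over the collected headings
def pvFinalB (target : List Char) : List (List Char × Nat × Nat) → Option (Int × Int)
  | [] => none
  | (s, lvl, ins) :: hs =>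
    if pvHeadTextB s = some target then some ((ins : Int), (lvl : Int))
    else pvFinalB target hs

def find_heading_insertion_point_alt (lines : List String) (target_heading : String) : Option (Int × Int) :=
  pvFinalB (PySem.Chars.strip target_heading.toList) (pvBackB lines.length lines 0).2

-- ===== PRECONDITION & SPEC =====
def Spec_find_heading_insertion_point (lines : List String) (target_heading : String) (out : Option (Int × Int)) : Prop := out = find_heading_insertion_point_alt lines target_heading
instance (lines : List String) (target_heading : String) (out : Option (Int × Int)) : Decidable (Spec_find_heading_insertion_point lines target_heading out) := by unfold Spec_find_heading_insertion_point; infer_instance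

-- ===== CLAIM (what is proved, stated in full; the proofs are below) =====
def Claim_equal_find_heading_insertion_point : Prop := ∀ (lines : List String) (target_heading : String), Dom_find_heading_insertion_point lines target_heading → Spec_find_heading_insertion_point lines target_heading (find_heading_insertion_point lines target_heading)

-- ===== LEMMAS AND PROOFS =====

theorem pv_count_go_acc_le (sub : List Char) (fuel : Nat) (l : List Char) (acc : Nat) :
    acc ≤ PySem.Chars.count.go sub fuel l acc := by
  induction fuel generalizing l acc with
  | zero => simp [PySem.Chars.count.go]
  | succ n ih =>
    cases l with
    | nil => simp [PySem.Chars.count.go]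
    | cons h t =>
      simp only [PySem.Chars.count.go]
      split
      · exact le_trans (Nat.le_succ acc) (ih _ _)
      · exact ih _ _

theorem pv_one_le_count_of_head (t : List Char) : 1 ≤ PySem.Chars.count ('*' :: t) ['*'] := by
  simp only [PySem.Chars.count, List.isEmpty_cons]
  simp only [PySem.Chars.count.go, List.isPrefixOf, Bool.and_true, List.length_cons]
  simp only [beq_self_eq_true, if_pos]
  exact pv_count_go_acc_le _ _ _ 1

theorem pv_startswith_count (s : List Char) (h : PySem.Chars.startswith s ['*'] = true) :
    1 ≤ PySem.Chars.count s ['*'] := by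
  rw [PySem.Chars.startswith_iff] at h
  obtain ⟨u, rfl⟩ := h
  exact pv_one_le_count_of_head u

theorem pvTagLoopA_append (ws : List (List Char)) (w : List Char) (j : Nat) (hj : j ≤ ws.length) :
    pvTagLoopA (ws ++ [w]) j = pvTagLoopA ws j := by
  induction j with
  | zero => rfl
  | succ k ih =>
    simp only [pvTagLoopA]
    rw [List.getD_append _ _ _ _ (by omega), List.take_append_of_le_length (by omega)]
    rw [ih (by omega)]

theorem pvTagLoopA_eq (ws : List (List Char)) :
    pvTagLoopA ws ws.length =
      (let kept := (ws.reverse.dropWhile (fun w => PySem.Chars.isIn [':'] w)).reverse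
       if kept.isEmpty then none else some (PySem.Chars.join [' '] kept)) := by
  induction ws using List.reverseRecOn with
  | nil => rfl
  | append_singleton ws w ih =>
    have hlen : (ws ++ [w]).length = ws.length + 1 := by simp
    rw [hlen]
    simp only [pvTagLoopA, List.getD_append_right _ _ _ _ (le_refl _), Nat.sub_self,
      List.getD_cons_zero]
    by_cases hw : PySem.Chars.isIn [':'] w = true
    · rw [if_pos hw, pvTagLoopA_append ws w ws.length le_rfl, ih]
      simp [hw]
    · rw [if_neg hw, List.take_of_length_le (by simp)]
      simp [hw]

theorem pvHeadText_eq (s : List Char) : pvHeadTextA s = pvHeadTextB s := by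
  unfold pvHeadTextA pvHeadTextB pvLstripStars pvTagStripA pvTagStripB
  split
  · exact pvTagLoopA_eq _
  · rfl

theorem pv_dropWhile_mono {α : Type} (p q : α → Bool) (h : ∀ x, q x = true → p x = true)
    (l : List α) : (l.dropWhile q).dropWhile p = l.dropWhile p := by
  induction l with
  | nil => rfl
  | cons a t ih =>
    by_cases hq : q a = true
    · simp only [List.dropWhile_cons, hq, if_true, h a hq, ih]
    · have hq' : q a = false := by simpa using hq
      simp [List.dropWhile_cons, hq']

-- the stack invariant: querying the stack for level L answers A's forward scan
theorem pvBack_inv (n : Nat) (rs : List String) (i : Nat) (L : Nat) :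
    (match (pvBackB n rs i).1.dropWhile (fun e => decide (L < e.2)) with
     | [] => n | e :: _ => e.1) = (pvScanA L rs i).getD n := by
  induction rs generalizing i with
  | nil => rfl
  | cons l t ih =>
    simp only [pvBackB, pvScanA]
    by_cases hs : PySem.Chars.startswith (PySem.Chars.strip l.toList) ['*'] = true
    · rw [if_pos hs, if_pos hs]
      set lvl := PySem.Chars.count (PySem.Chars.strip l.toList) ['*'] with hlvl
      by_cases hle : lvl ≤ L
      · rw [if_pos hle]
        simp only [List.dropWhile_cons, decide_eq_true_eq, Nat.not_lt.mpr hle]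
        simp
      · rw [if_neg hle]
        have hLlt : L < lvl := by omega
        simp only [List.dropWhile_cons, decide_eq_true_eq, if_pos hLlt]
        rw [← ih (i+1)]
        -- dropWhile (L<·) ignores the pops: stk2 and the original stack agree under it
        have hmono := pv_dropWhile_mono (fun e => decide (L < e.2)) (fun e => decide (lvl < e.2))
          (by intro x hx; simp at hx ⊢; omega) (pvBackB n t (i+1)).1
        cases hstk1 : (pvBackB n t (i+1)).1.dropWhile (fun e => decide (lvl < e.2)) with
        | nil => rw [← hmono, hstk1]
        | cons e tl =>
          by_cases he : (e.2 == lvl) = true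
          · have hpe : decide (L < e.2) = true := by
              simp at he ⊢; omega
            simp only [he, if_true]
            rw [← hmono, hstk1, List.dropWhile_cons, hpe]
            simp
          · have he' : (e.2 == lvl) = false := by simpa using he
            simp only [he']
            rw [← hmono, hstk1]
            simp
    · rw [if_neg hs, if_neg hs]
      exact ih (i+1)

theorem pvLoop_eq (n : Nat) (target : List Char) (rs : List String) (i : Nat) :
    pvLoopA n target rs i = pvFinalB target (pvBackB n rs i).2 := by
  induction rs generalizing i with
  | nil => rfl
  | cons l t ih =>
    simp only [pvLoopA, pvBackB]
    by_cases hs : PySem.Chars.startswith (PySem.Chars.strip l.toList) ['*'] = true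
    · have hc := pv_startswith_count _ hs
      rw [if_pos (by simp [hs, hc]), if_pos hs]
      simp only [pvFinalB, pvHeadText_eq]
      cases hb : pvHeadTextB (PySem.Chars.strip l.toList) with
      | none =>
        rw [if_neg (by simp)]
        exact ih (i+1)
      | some ht =>
        dsimp only
        by_cases hm : ht = target
        · rw [if_pos hm, if_pos (by rw [hm])]
          have hinv := pvBack_inv n t (i+1) (PySem.Chars.count (PySem.Chars.strip l.toList) ['*'])
          cases hsc : pvScanA (PySem.Chars.count (PySem.Chars.strip l.toList) ['*']) t (i+1) with
          | none => rw [hsc] at hinv; simp only [Option.getD_none] at hinv; rw [hinv]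
          | some j => rw [hsc] at hinv; simp only [Option.getD_some] at hinv; rw [hinv]
        · rw [if_neg hm, if_neg (by simp [hm])]
          exact ih (i+1)
    · rw [if_neg (by simp [hs]), if_neg hs]
      exact ih (i+1)

-- ===== VERDICT (by name: the statement is the Claim_ definition above) =====
theorem find_heading_insertion_point_spec : Claim_equal_find_heading_insertion_point := by
  intro lines target_heading _
  unfold Spec_find_heading_insertion_point find_heading_insertion_point find_heading_insertion_point_alt
  exact pvLoop_eq _ _ _ _
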